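-- pv_equiv track=rewrite | github.com/perfectlyodd/spoj-python | palindrome.py | bookend_numerical_string
-- ===== SOURCE A (Python) =====
-- def add_one_to_string(string_number, length):
--     if length == 0:
--         return '1'
--     last_char = string_number[length - 1]
--     if '0' <= last_char and last_char <= '8':
--         return string_number[:-1] + chr(ord(last_char) + 1)
--     elif last_char == '9':
--         return add_one_to_string(string_number[:-1], length - 1) + '0'
--     else:
--         return '0000'
--
-- def is_bookended(string_number, length):
--     return string_number[0] == string_number[length - 1]
--
-- def bookend_numerical_string(string_number, length):
--     if length == 0:
--         return string_number
--     if is_bookended(string_number, length):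
--         return string_number
--     else:
--         return bookend_numerical_string(
--             add_one_to_string(string_number, length),
--             length
--         )
-- ===== SOURCE B (Python) =====
-- def bookend_numerical_string(string_number, length):
--     if length == 0:
--         return string_number
--     s = string_number
--     while s[0] != s[length - 1]:
--         j = length - 1
--         while j >= 0 and s[j] == '9':
--             j -= 1
--         if j < 0:
--             s = '1' + '0' * length
--         else:
--             c = s[j]
--             if '0' <= c <= '8':
--                 s = s[:j] + chr(ord(c) + 1) + '0' * (length - 1 - j)
--             else:
--                 s = '0000'
--     return s
-- ===== Notes on version B (the rewrite author's own statement) =====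
-- stated objective: simpler
-- what changed: The recursive digit-carry helper (which peels trailing '9's by slicing and recursing) is replaced by a single iterative right-to-left scan that finds the rightmost non-'9' digit and rebuilds the string in one step, and the outer tail recursion becomes a while loop; the is_bookended helper disappears into the loop guard.
-- outside the precondition, e.g. on bookend_numerical_string('a0', 2): A returns '00000', B returns '0000'; on bookend_numerical_string('0a1', 3): A returns '00000', B returns '0000'; on bookend_numerical_string('0a0', -1): A returns '0000', B raises IndexError
import Mathlib
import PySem

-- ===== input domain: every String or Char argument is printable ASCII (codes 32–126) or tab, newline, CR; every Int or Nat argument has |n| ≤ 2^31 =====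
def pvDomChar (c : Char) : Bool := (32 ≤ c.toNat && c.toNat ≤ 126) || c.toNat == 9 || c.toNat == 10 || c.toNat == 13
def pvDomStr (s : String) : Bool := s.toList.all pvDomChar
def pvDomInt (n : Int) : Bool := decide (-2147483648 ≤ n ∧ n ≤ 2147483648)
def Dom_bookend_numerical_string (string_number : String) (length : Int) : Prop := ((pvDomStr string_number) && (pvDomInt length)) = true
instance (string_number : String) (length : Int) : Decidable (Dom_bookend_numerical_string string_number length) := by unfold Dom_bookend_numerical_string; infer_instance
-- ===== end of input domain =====

-- B rewrites A's recursive slice-based carry helper as one iterative right-to-left scan and the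
-- outer tail recursion as a while loop (simpler decomposition; return value only, no mutation).

-- ===== PORT A =====
-- add_one_to_string: recursion on the string with the last char sliced off; the fuel argument
-- (always called with l.length + 1, which the recursion never exhausts) only makes the
-- recursion structural; 'none' branches mark inputs where Python raises IndexError.
def pvAddOneA : Nat → List Char → Int → List Char
  | 0, _, _ => []   -- fuel exhausted: unreachable, the callers pass fuel > l.length
  | f + 1, l, length =>
    if length = 0 then ['1']
    else
      match PySem.List.pyGet? l (length - 1) with
      | none => []   -- Python raises IndexError here (outside Pre_)
      | some last_char =>
        if '0' ≤ last_char ∧ last_char ≤ '8' then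
          PySem.List.slice l none (some (-1)) ++ [Char.ofNat (last_char.toNat + 1)]
        else if last_char = '9' then
          pvAddOneA f (PySem.List.slice l none (some (-1))) (length - 1) ++ ['0']
        else
          ['0', '0', '0', '0']

def pvIsBookendedA (l : List Char) (length : Int) : Bool :=
  match PySem.List.pyGet? l 0, PySem.List.pyGet? l (length - 1) with
  | some x, some y => x == y
  | _, _ => false   -- Python raises IndexError here (outside Pre_)

-- outer tail recursion of A, with fuel for totality (10 iterations suffice on Pre_ inputs)
def pvBookendA : Nat → List Char → Int → List Char
  | 0, l, _ => l   -- fuel exhausted (never reached on Pre_ inputs)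
  | n + 1, l, length =>
    if length = 0 then l
    else if pvIsBookendedA l length then l
    else pvBookendA n (pvAddOneA (l.length + 1) l length) length

def bookend_numerical_string (string_number : String) (length : Int) : String :=
  String.ofList (pvBookendA 100 string_number.toList length)

-- ===== PORT B =====
-- inner while loop of B: scan left from j while s[j] == '9' (fuel, always sufficient, makes
-- the loop structural)
def pvFindJ : Nat → List Char → Int → Int
  | 0, _, j => j   -- fuel exhausted: unreachable, the caller passes fuel ≥ j + 1
  | f + 1, l, j =>
    if 0 ≤ j then
      match PySem.List.pyGet? l j with
      | none => j   -- Python raises IndexError here (outside Pre_)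
      | some c => if c = '9' then pvFindJ f l (j - 1) else j
    else j

-- one body of B's while loop
def pvIncB (l : List Char) (length : Int) : List Char :=
  let j := pvFindJ length.toNat l (length - 1)
  if j < 0 then '1' :: List.replicate length.toNat '0'
  else
    match PySem.List.pyGet? l j with
    | none => []   -- unreachable: pvFindJ stopped on a fetched char
    | some c =>
      if '0' ≤ c ∧ c ≤ '8' then
        PySem.List.slice l none (some j) ++ [Char.ofNat (c.toNat + 1)] ++
          List.replicate (length - 1 - j).toNat '0'
      else
        ['0', '0', '0', '0']

-- the while loop of B, with fuel for totality
def pvLoopB : Nat → List Char → Int → List Char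
  | 0, l, _ => l   -- fuel exhausted (never reached on Pre_ inputs)
  | n + 1, l, length =>
    match PySem.List.pyGet? l 0, PySem.List.pyGet? l (length - 1) with
    | some x, some y => if x = y then l else pvLoopB n (pvIncB l length) length
    | _, _ => l   -- Python raises IndexError here (outside Pre_)

def bookend_numerical_string_alt (string_number : String) (length : Int) : String :=
  String.ofList (if length = 0 then string_number.toList
                 else pvLoopB 100 string_number.toList length)

-- ===== PRECONDITION & SPEC =====
-- Pre_ excludes (a) inputs on which A raises IndexError or overflows the stack, and (b) the
-- accidental sentinel chains where length ≠ len(s) or digits and non-digits are mixed, on which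
-- A's '0000' sentinel picks up leftover carry zeros from its slicing (e.g. 'a0' with length 2
-- gives '00000'); admitted: length 0, proper digit strings with length = len(s), strings
-- already bookended, and short strings whose scanned char is a non-digit (one-step sentinel).
def Pre_bookend_numerical_string (string_number : String) (length : Int) : Prop :=
  length = 0
  ∨ (0 < length ∧ (string_number.toList.length : Int) = length ∧
      ∀ c ∈ string_number.toList, '0' ≤ c ∧ c ≤ '9')
  ∨ (PySem.List.pyGet? string_number.toList (length - 1) =
       PySem.List.pyGet? string_number.toList 0 ∧
     PySem.List.pyGet? string_number.toList 0 ≠ none)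
  ∨ (1 ≤ length ∧ length ≤ 4 ∧
     (PySem.List.pyGet? string_number.toList (length - 1)).any
       (fun c => !decide ('0' ≤ c ∧ c ≤ '9')) = true)
instance (string_number : String) (length : Int) : Decidable (Pre_bookend_numerical_string string_number length) := by unfold Pre_bookend_numerical_string; infer_instance

def pvWitness_bookend_numerical_string : String × Int := ("", 0)

def Spec_bookend_numerical_string (string_number : String) (length : Int) (out : String) : Prop := out = bookend_numerical_string_alt string_number length
instance (string_number : String) (length : Int) (out : String) : Decidable (Spec_bookend_numerical_string string_number length out) := by unfold Spec_bookend_numerical_string; infer_instance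

-- ===== CLAIM (what is proved, stated in full; the proofs are below) =====
def Claim_equal_bookend_numerical_string : Prop := ∀ (string_number : String) (length : Int), Dom_bookend_numerical_string string_number length → Pre_bookend_numerical_string string_number length → Spec_bookend_numerical_string string_number length (bookend_numerical_string string_number length)

-- ===== LEMMAS AND PROOFS =====

-- characters of a proper digit string
def pvDigits (l : List Char) : Prop := ∀ c ∈ l, '0' ≤ c ∧ c ≤ '9'

theorem pvCharLe (a b : Char) : a ≤ b ↔ a.toNat ≤ b.toNat := by
  simp [Char.le_def, UInt32.le_iff_toNat_le]

theorem pvCharEq (a b : Char) : a = b ↔ a.toNat = b.toNat :=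
  ⟨fun h => h ▸ rfl, fun h => Char.ext (UInt32.toNat_inj.mp h)⟩

theorem pvNe9_le8 (c : Char) (h : '0' ≤ c ∧ c ≤ '9') (h9 : c ≠ '9') :
    '0' ≤ c ∧ c ≤ '8' := by
  simp only [pvCharLe] at *
  have e9 : ('9' : Char).toNat = 57 := by decide
  have e8 : ('8' : Char).toNat = 56 := by decide
  have h57 : c.toNat ≠ 57 := fun hh => h9 ((pvCharEq c '9').mpr (by rw [hh]; decide))
  refine ⟨h.1, ?_⟩
  rw [e8]; rw [e9] at h
  omega

theorem pvOfNatToNat (n : Nat) (h : n ≤ 57) : (Char.ofNat n).toNat = n := by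
  have hv : n.isValidChar := Or.inl (by omega)
  simp [Char.ofNat, hv]

theorem pvGet_append (xs : List Char) (x : Char) (j : Int) (h0 : 0 ≤ j)
    (h : j < (xs.length : Int)) :
    PySem.List.pyGet? (xs ++ [x]) j = PySem.List.pyGet? xs j := by
  rw [PySem.List.pyGet?_of_nonneg _ h0, PySem.List.pyGet?_of_nonneg _ h0]
  rw [List.getElem?_append_left (by omega)]

theorem pvFindJ_le (f : Nat) (l : List Char) (j : Int) : pvFindJ f l j ≤ j := by
  fun_induction pvFindJ f l j <;> omega

theorem pvFindJ_append (f : Nat) (xs : List Char) (x : Char) : ∀ (j : Int),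
    j < (xs.length : Int) → pvFindJ f (xs ++ [x]) j = pvFindJ f xs j := by
  induction f with
  | zero => intro j _; rfl
  | succ f ih =>
    intro j h
    rw [pvFindJ, pvFindJ]
    by_cases h0 : 0 ≤ j
    · rw [if_pos h0, if_pos h0, pvGet_append xs x j h0 h]
      cases hget : PySem.List.pyGet? xs j with
      | none => rfl
      | some c =>
        by_cases h9 : c = '9'
        · simp only [h9]
          exact ih (j - 1) (by omega)
        · simp [h9]
    · rw [if_neg h0, if_neg h0]

theorem pvFindJ_stop (f : Nat) (l : List Char) (j : Int) (hj : j < (l.length : Int))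
    (hf : (j + 1).toNat ≤ f) (hnn : 0 ≤ pvFindJ f l j) :
    ∃ c, PySem.List.pyGet? l (pvFindJ f l j) = some c ∧ c ≠ '9' := by
  fun_induction pvFindJ f l j with
  | case1 l j => omega
  | case2 f l j h0 heq =>
    rw [PySem.List.pyGet?_eq_none_iff] at heq
    exact absurd ⟨by omega, by omega⟩ heq
  | case3 f l j h0 heq ih => exact ih (by omega) (by omega) hnn
  | case4 f l j h0 c heq h9 => exact ⟨c, heq, h9⟩
  | case5 f l j h0 => omega

theorem pvFindJ_all9 (f : Nat) (l : List Char) (j : Int) (hneg : pvFindJ f l j < 0) :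
    ∀ i : Int, 0 ≤ i → i ≤ j → PySem.List.pyGet? l i = some '9' := by
  fun_induction pvFindJ f l j with
  | case1 l j => omega
  | case2 f l j h0 heq => omega
  | case3 f l j h0 heq ih =>
    intro i hi hij
    rcases eq_or_lt_of_le hij with rfl | hlt
    · exact heq
    · exact ih hneg i hi (by omega)
  | case4 f l j h0 c heq h9 => omega
  | case5 f l j h0 => omega

-- the heart of the equivalence: A's recursive carry equals B's scan-based increment
theorem pvAddOne_eq (l : List Char) : ∀ (f : Nat), l.length < f → pvDigits l →
    pvAddOneA f l (l.length : Int) = pvIncB l (l.length : Int) := by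
  induction l using List.reverseRecOn with
  | nil =>
    intro f hf _
    obtain ⟨f', rfl⟩ : ∃ f', f = f' + 1 := ⟨f - 1, by omega⟩
    simp [pvAddOneA, pvIncB, pvFindJ]
  | append_singleton xs x ih =>
    intro f hf hd
    obtain ⟨f', rfl⟩ : ∃ f', f = f' + 1 := ⟨f - 1, by omega⟩
    have hxslen : xs.length < f' := by simp at hf; omega
    have hdx : '0' ≤ x ∧ x ≤ '9' := hd x (by simp)
    have hdxs : pvDigits xs := fun c hc => hd c (by simp [hc])
    have hlen : ((xs ++ [x]).length : Int) = (xs.length : Int) + 1 := by simp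
    have hcast : ((xs ++ [x]).length : Int) - 1 = (xs.length : Int) := by omega
    have hget : PySem.List.pyGet? (xs ++ [x]) ((xs.length : Int)) = some x := by
      simpa using PySem.List.pyGet?_append_length xs x []
    have hlenne : ¬ ((xs ++ [x]).length : Int) = 0 := by rw [hlen]; omega
    have hnlen : ((xs ++ [x]).length : Int).toNat = xs.length + 1 := by simp
    by_cases hx9 : x = '9'
    · -- carry case: both sides strip the trailing '9'
      subst hx9
      have h98 : ¬ ('0' ≤ '9' ∧ '9' ≤ '8') := by decide
      have hA : pvAddOneA (f' + 1) (xs ++ ['9']) ((xs ++ ['9']).length : Int) =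
          pvAddOneA f' xs (xs.length : Int) ++ ['0'] := by
        rw [pvAddOneA, if_neg hlenne, hcast, hget]
        simp [PySem.List.slice_to_neg_one]
      have hscan : pvFindJ (xs.length + 1) (xs ++ ['9']) ((xs.length : Int)) =
          pvFindJ xs.length xs ((xs.length : Int) - 1) := by
        rw [pvFindJ, if_pos (by positivity), hget]
        have hap := pvFindJ_append xs.length xs '9' ((xs.length : Int) - 1) (by omega)
        simp [hap]
      rw [hA, ih f' hxslen hdxs]
      simp only [pvIncB, hnlen, hcast, Int.toNat_natCast]
      rw [hscan]
      set j := pvFindJ xs.length xs ((xs.length : Int) - 1) with hjdef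
      have hjle : j ≤ (xs.length : Int) - 1 := pvFindJ_le _ _ _
      by_cases hjneg : j < 0
      · -- full carry: 1 followed by zeros
        rw [if_pos hjneg, if_pos hjneg, List.replicate_succ' (n := xs.length)]
        simp
      · -- the scan stopped on a digit below '9'
        rw [not_lt] at hjneg
        obtain ⟨c, hc, hc9⟩ := pvFindJ_stop xs.length xs ((xs.length : Int) - 1)
          (by omega) (by omega) (by rw [← hjdef]; omega)
        rw [← hjdef] at hc
        have hcmem : c ∈ xs := PySem.List.mem_of_pyGet?_eq_some xs hc
        have hcd : '0' ≤ c ∧ c ≤ '9' := hdxs c hcmem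
        have hc8 : '0' ≤ c ∧ c ≤ '8' := pvNe9_le8 c hcd hc9
        have hgetj : PySem.List.pyGet? (xs ++ ['9']) j = PySem.List.pyGet? xs j :=
          pvGet_append xs '9' j hjneg (by omega)
        rw [if_neg (by omega), if_neg (by omega), hgetj, hc]
        simp only [if_pos hc8]
        have hsl : PySem.List.slice (xs ++ ['9']) none (some j) =
            PySem.List.slice xs none (some j) := by
          rw [PySem.List.slice_to _ hjneg, PySem.List.slice_to _ hjneg]
          rw [List.take_append_of_le_length (by omega)]
        rw [hsl]
        have hrep : ((xs.length : Int) - j).toNat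
            = ((xs.length : Int) - 1 - j).toNat + 1 := by omega
        rw [hrep, List.replicate_succ']
        simp
    · -- last digit below '9': both sides bump it and keep the prefix
      have hx8 : '0' ≤ x ∧ x ≤ '8' := pvNe9_le8 x hdx hx9
      have hA : pvAddOneA (f' + 1) (xs ++ [x]) ((xs ++ [x]).length : Int) =
          xs ++ [Char.ofNat (x.toNat + 1)] := by
        rw [pvAddOneA, if_neg hlenne, hcast, hget]
        simp [hx8, PySem.List.slice_to_neg_one]
      have hscan : pvFindJ (xs.length + 1) (xs ++ [x]) ((xs.length : Int)) =
          (xs.length : Int) := by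
        rw [pvFindJ, if_pos (by positivity), hget]
        simp [hx9]
      rw [hA]
      simp only [pvIncB, hnlen, hcast, Int.toNat_natCast]
      rw [hscan, if_neg (by omega), hget]
      simp only [if_pos hx8]
      rw [PySem.List.slice_to _ (by positivity)]
      rw [Int.toNat_natCast, List.take_append_of_le_length (by omega), List.take_length]
      have hrep : ((xs.length : Int) - (xs.length : Int)).toNat = 0 := by omega
      rw [hrep]
      simp

-- digit '0'..'8' bumped by one is still a digit
theorem pvDigitSucc (c : Char) (h : '0' ≤ c ∧ c ≤ '8') :
    '0' ≤ Char.ofNat (c.toNat + 1) ∧ Char.ofNat (c.toNat + 1) ≤ '9' := by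
  simp only [pvCharLe] at *
  have h8' : ('8' : Char).toNat = 56 := by decide
  have h0' : ('0' : Char).toNat = 48 := by decide
  have h9' : ('9' : Char).toNat = 57 := by decide
  rw [h0', h8'] at h
  rw [h0', h9', pvOfNatToNat _ (by omega)]
  omega

-- one increment of B keeps the length and the digit property (on non-bookended digit strings)
theorem pvIncB_preserve (l : List Char) (hd : pvDigits l) (x y : Char)
    (h0 : PySem.List.pyGet? l 0 = some x)
    (hl : PySem.List.pyGet? l ((l.length : Int) - 1) = some y) (hxy : x ≠ y) :
    (pvIncB l (l.length : Int)).length = l.length ∧ pvDigits (pvIncB l (l.length : Int)) := by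
  have hne : l ≠ [] := fun h => by simp [h, PySem.List.pyGet?, PySem.List.pyIdx?] at h0
  have hpos : 0 < l.length := List.length_pos_of_ne_nil hne
  set j := pvFindJ ((l.length : Int)).toNat l ((l.length : Int) - 1) with hjdef
  have hjle : j ≤ (l.length : Int) - 1 := pvFindJ_le _ _ _
  by_cases hjneg : j < 0
  · exfalso
    have hall := pvFindJ_all9 ((l.length : Int)).toNat l ((l.length : Int) - 1)
      (by rw [← hjdef]; omega)
    have hx : x = '9' := by
      have := hall 0 le_rfl (by omega); rw [h0] at this; exact Option.some.inj this.symm |>.symm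
    have hy : y = '9' := by
      have := hall ((l.length : Int) - 1) (by omega) le_rfl
      rw [hl] at this; exact Option.some.inj this.symm |>.symm
    exact hxy (hx.trans hy.symm)
  · rw [not_lt] at hjneg
    obtain ⟨c, hc, hc9⟩ := pvFindJ_stop ((l.length : Int)).toNat l ((l.length : Int) - 1)
      (by omega) (by omega) (by rw [← hjdef]; omega)
    rw [← hjdef] at hc
    have hcmem : c ∈ l := PySem.List.mem_of_pyGet?_eq_some l hc
    have hcd : '0' ≤ c ∧ c ≤ '9' := hd c hcmem
    have hc8 : '0' ≤ c ∧ c ≤ '8' := pvNe9_le8 c hcd hc9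
    have hB : pvIncB l ((l.length : Int)) =
        PySem.List.slice l none (some j) ++ [Char.ofNat (c.toNat + 1)] ++
          List.replicate (((l.length : Int)) - 1 - j).toNat '0' := by
      rw [pvIncB]
      simp only [← hjdef]
      rw [if_neg (by omega), hc]
      simp only [if_pos hc8]
    rw [hB]
    have hslice : PySem.List.slice l none (some j) = l.take j.toNat :=
      PySem.List.slice_to _ hjneg
    constructor
    · rw [hslice]
      simp only [List.length_append, List.length_take, List.length_replicate,
        List.length_cons, List.length_nil]
      omega
    · intro d hdmem
      simp only [List.mem_append, List.mem_singleton, List.mem_replicate] at hdmem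
      rcases hdmem with (hmem | rfl) | hmem
      · exact hd d (List.mem_of_mem_take (hslice ▸ hmem))
      · exact pvDigitSucc c hc8
      · rw [hmem.2]; exact ⟨le_refl _, by decide⟩

-- the two loops agree step by step on proper digit strings
theorem pvLoop_eq (n : Nat) : ∀ (l : List Char), 0 < l.length → pvDigits l →
    pvBookendA n l (l.length : Int) = pvLoopB n l (l.length : Int) := by
  induction n with
  | zero => intro l _ _; rfl
  | succ n ih =>
    intro l hpos hd
    have h0 : PySem.List.pyGet? l 0 = some l[0] := by
      simpa using PySem.List.pyGet?_eq_some_getElem l (i := 0) (by omega)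
        (by exact_mod_cast hpos)
    have hlast : PySem.List.pyGet? l ((l.length : Int) - 1) = some l[l.length - 1] := by
      have := PySem.List.pyGet?_eq_some_getElem l (i := (l.length : Int) - 1)
        (by omega) (by omega)
      simpa [show ((l.length : Int) - 1).toNat = l.length - 1 by omega] using this
    have hlenne : ¬ (l.length : Int) = 0 := by omega
    rw [pvBookendA, pvLoopB, if_neg hlenne, h0, hlast]
    rw [pvIsBookendedA, h0, hlast]
    by_cases heq : l[0] = l[l.length - 1]
    · simp [heq]
    · have hstep : pvAddOneA (l.length + 1) l (l.length : Int) = pvIncB l (l.length : Int) :=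
        pvAddOne_eq l (l.length + 1) (by omega) hd
      obtain ⟨hlen', hd'⟩ := pvIncB_preserve l hd _ _ h0 hlast heq
      have hih := ih (pvIncB l (l.length : Int)) (by omega) hd'
      rw [hlen'] at hih
      simp [heq, hstep, hih]

-- evaluating the sentinel tail: both loops return '0000' for length 1..4
theorem pvSentinel (length : Int) (h1 : 1 ≤ length) (h4 : length ≤ 4) :
    pvBookendA 99 ['0','0','0','0'] length = pvLoopB 99 ['0','0','0','0'] length := by
  interval_cases length <;> decide

-- ===== VERDICT (by name: the statement is the Claim_ definition above) =====
theorem bookend_numerical_string_spec : Claim_equal_bookend_numerical_string := by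
  unfold Claim_equal_bookend_numerical_string
  intro s length _ hpre
  unfold Spec_bookend_numerical_string bookend_numerical_string bookend_numerical_string_alt
  rcases hpre with h0 | ⟨hpos, hlen, hd⟩ | ⟨hbk, hne⟩ | ⟨h1, h4, hany⟩
  · subst h0
    rw [if_pos rfl]
    rw [show pvBookendA 100 s.toList 0 = s.toList by rw [pvBookendA]; simp]
  · rw [if_neg (by omega)]
    have := pvLoop_eq 100 s.toList (by omega) hd
    rw [hlen] at this
    rw [this]
  · -- the string is already bookended: both return it unchanged
    obtain ⟨x, hx⟩ : ∃ x, PySem.List.pyGet? s.toList 0 = some x :=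
      Option.ne_none_iff_exists'.mp hne
    rw [hx] at hbk
    by_cases h0 : length = 0
    · subst h0
      rw [if_pos rfl, show pvBookendA 100 s.toList 0 = s.toList by rw [pvBookendA]; simp]
    · rw [if_neg h0]
      rw [pvBookendA, pvLoopB, if_neg (by exact_mod_cast h0), hx, hbk]
      rw [pvIsBookendedA, hx, hbk]
      simp
  · -- the scanned char is a non-digit: one step to the '0000' sentinel on both sides
    obtain ⟨c, hc, hcnd⟩ : ∃ c, PySem.List.pyGet? s.toList (length - 1) = some c ∧
        ¬ ('0' ≤ c ∧ c ≤ '9') := by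
      cases hget : PySem.List.pyGet? s.toList (length - 1) with
      | none => rw [hget] at hany; simp [Option.any] at hany
      | some c =>
        rw [hget] at hany; simp [Option.any] at hany
        exact ⟨c, rfl, by rw [not_and_or, not_le, not_le]; exact hany⟩
    have hne' : s.toList ≠ [] := by
      intro h; rw [h] at hc; simp [PySem.List.pyGet?, PySem.List.pyIdx?] at hc
    have hpos : 0 < s.toList.length := List.length_pos_of_ne_nil hne'
    have hx : PySem.List.pyGet? s.toList 0 = some s.toList[0] := by
      simpa using PySem.List.pyGet?_eq_some_getElem s.toList (i := 0) (by omega)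
        (by exact_mod_cast hpos)
    rw [if_neg (by omega)]
    rw [pvBookendA, pvLoopB, if_neg (by omega), hx, hc]
    rw [pvIsBookendedA, hx, hc]
    by_cases heq : s.toList[0] = c
    · simp [heq]
    · have hc8 : ¬ ('0' ≤ c ∧ c ≤ '8') := by
        intro ⟨ha, hb⟩
        exact hcnd ⟨ha, le_trans hb (by decide)⟩
      have hc9 : ¬ c = '9' := by intro h; subst h; exact hcnd (by decide)
      have hA : pvAddOneA (s.toList.length + 1) s.toList length = ['0','0','0','0'] := by
        rw [pvAddOneA, if_neg (by omega), hc]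
        simp [hc8, hc9]
      have hB : pvIncB s.toList length = ['0','0','0','0'] := by
        have hfj : pvFindJ length.toNat s.toList (length - 1) = length - 1 := by
          obtain ⟨f', hf'⟩ : ∃ f', length.toNat = f' + 1 := ⟨length.toNat - 1, by omega⟩
          rw [hf', pvFindJ, if_pos (by omega), hc]
          simp [hc9]
        rw [pvIncB]
        simp only [hfj]
        rw [if_neg (by omega), hc]
        simp [hc8]
      simp [heq, hB]
      rw [show s.length = s.toList.length by simp, hA]
      exact congrArg _ (pvSentinel length h1 h4)
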